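-- pv_equiv track=rewrite | github.com/gakukuriu/ManyToOneSAT | manyToOneSat.py | improvementForHospital_pref
-- ===== SOURCE A (Python) =====
-- from itertools import permutations
--
-- n = 2
--
-- def internsPreferInPref(h1, h2, ip):
--     preflists = list(permutations(range(n+1)))
--     ip_list = preflists[ip]
--     return(ip_list.index(h1) < ip_list.index(h2))
--
-- def improvementForHospital_pref(ip1, ip2, h):
--     for h1 in range(n+1):
--         if (internsPreferInPref(h+1, h1, ip2)):
--             if not (internsPreferInPref(h+1, h1, ip1)):
--                 return False
--         for h2 in range(h1+1, n+1):
--             if (h1 != h+1) & (h2 != h+1):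
--                 if (internsPreferInPref(h1, h2, ip1)):
--                     if not (internsPreferInPref(h1, h2, ip2)):
--                         return False
--                 if (internsPreferInPref(h1, h2, ip2)):
--                     if not (internsPreferInPref(h1, h2, ip1)):
--                         return False
--     return True
-- ===== SOURCE B (Python) =====
-- from itertools import permutations
--
-- n = 2
--
-- def improvementForHospital_pref(ip1, ip2, h):
--     # Direct characterisation: the two preference lists must agree on the
--     # relative order of all hospitals other than h+1, and h+1 may only move
--     # up (its rank in list ip1 is at most its rank in list ip2).
--     preflists = list(permutations(range(n + 1)))
--     p1 = preflists[ip1]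
--     p2 = preflists[ip2]
--     r1 = [x for x in p1 if x != h + 1]
--     r2 = [x for x in p2 if x != h + 1]
--     return r1 == r2 and p1.index(h + 1) <= p2.index(h + 1)
-- ===== Notes on version B (the rewrite author's own statement) =====
-- stated objective: simpler
-- what changed: Replaces the doubly nested loop of O(n^2) pairwise rank queries (each rebuilding the permutation table) with one direct check: the two permutations restricted to hospitals other than h+1 must be equal, and the rank of h+1 in list ip1 must be <= its rank in list ip2.
import Mathlib
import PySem

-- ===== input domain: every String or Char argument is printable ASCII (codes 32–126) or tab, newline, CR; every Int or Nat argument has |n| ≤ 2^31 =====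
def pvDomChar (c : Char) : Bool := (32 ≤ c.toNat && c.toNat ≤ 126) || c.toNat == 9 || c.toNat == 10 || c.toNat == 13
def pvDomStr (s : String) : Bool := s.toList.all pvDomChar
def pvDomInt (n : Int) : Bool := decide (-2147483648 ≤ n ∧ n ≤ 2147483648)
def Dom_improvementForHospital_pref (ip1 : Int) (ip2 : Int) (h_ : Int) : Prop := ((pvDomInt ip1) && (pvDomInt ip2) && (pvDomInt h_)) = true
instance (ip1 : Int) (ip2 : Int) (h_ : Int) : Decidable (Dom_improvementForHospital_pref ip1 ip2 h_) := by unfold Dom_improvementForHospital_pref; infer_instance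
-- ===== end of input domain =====

-- B replaces A's double loop of pairwise rank queries by one direct check
-- (equal order on hospitals ≠ h+1, and rank of h+1 in list ip1 ≤ its rank in list ip2);
-- objective: simpler.

-- Shared port of itertools.permutations(range(n+1)) in itertools order
-- (positions chosen left to right); fuel = list length, only for totality.
def pvPermsAux : Nat → List Int → List (List Int)
  | 0, _ => [[]]
  | Nat.succ k, l =>
    if l.isEmpty then [[]]
    else (List.range l.length).flatMap (fun i =>
      (pvPermsAux k (l.eraseIdx i)).map (fun p => l.getD i 0 :: p))

def pvPerms (l : List Int) : List (List Int) := pvPermsAux l.length l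

def pvN : Int := 2  -- module constant n = 2

-- ===== PORT A =====
def internsPreferInPref (h1 : Int) (h2 : Int) (ip : Int) : Bool :=
  let preflists := pvPerms (PySem.List.pyRange 0 (pvN + 1) 1)
  match PySem.List.pyGet? preflists ip with
  | none => false   -- IndexError: outside Pre_
  | some ipl =>
    match PySem.List.index? ipl h1, PySem.List.index? ipl h2 with
    | some i, some j => decide (i < j)
    | _, _ => false  -- ValueError: outside Pre_

def pvAInner (ip1 : Int) (ip2 : Int) (h_ : Int) (h1 : Int) : List Int → Bool
  | [] => true
  | h2 :: rest =>
    if (h1 != h_ + 1) && (h2 != h_ + 1) then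
      if internsPreferInPref h1 h2 ip1 && !(internsPreferInPref h1 h2 ip2) then false
      else if internsPreferInPref h1 h2 ip2 && !(internsPreferInPref h1 h2 ip1) then false
      else pvAInner ip1 ip2 h_ h1 rest
    else pvAInner ip1 ip2 h_ h1 rest

def pvAOuter (ip1 : Int) (ip2 : Int) (h_ : Int) : List Int → Bool
  | [] => true
  | h1 :: rest =>
    if internsPreferInPref (h_ + 1) h1 ip2 && !(internsPreferInPref (h_ + 1) h1 ip1) then false
    else if !(pvAInner ip1 ip2 h_ h1 (PySem.List.pyRange (h1 + 1) (pvN + 1) 1)) then false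
    else pvAOuter ip1 ip2 h_ rest

def improvementForHospital_pref (ip1 : Int) (ip2 : Int) (h_ : Int) : Bool :=
  pvAOuter ip1 ip2 h_ (PySem.List.pyRange 0 (pvN + 1) 1)

-- ===== PORT B =====
def improvementForHospital_pref_alt (ip1 : Int) (ip2 : Int) (h_ : Int) : Bool :=
  let preflists := pvPerms (PySem.List.pyRange 0 (pvN + 1) 1)
  match PySem.List.pyGet? preflists ip1, PySem.List.pyGet? preflists ip2 with
  | some p1, some p2 =>
    let r1 := p1.filter (fun x => x != h_ + 1)
    let r2 := p2.filter (fun x => x != h_ + 1)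
    if r1 = r2 then
      match PySem.List.index? p1 (h_ + 1), PySem.List.index? p2 (h_ + 1) with
      | some i, some j => decide (i ≤ j)
      | _, _ => false   -- ValueError: outside Pre_
    else false
  | _, _ => false       -- IndexError: outside Pre_

-- ===== PRECONDITION & SPEC =====
-- Pre_ excludes exactly the inputs where A raises: IndexError when ip1 or ip2 is
-- outside the 6-element permutation table's index range [-6,5], and ValueError
-- when h+1 is not a hospital number (h ∉ [-1,1]).
def Pre_improvementForHospital_pref (ip1 : Int) (ip2 : Int) (h_ : Int) : Prop :=
  -6 ≤ ip1 ∧ ip1 ≤ 5 ∧ -6 ≤ ip2 ∧ ip2 ≤ 5 ∧ -1 ≤ h_ ∧ h_ ≤ 1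
instance (ip1 : Int) (ip2 : Int) (h_ : Int) : Decidable (Pre_improvementForHospital_pref ip1 ip2 h_) := by unfold Pre_improvementForHospital_pref; infer_instance

def pvWitness_improvementForHospital_pref : Int × Int × Int := (1, 3, 0)

def Spec_improvementForHospital_pref (ip1 : Int) (ip2 : Int) (h_ : Int) (out : Bool) : Prop := out = improvementForHospital_pref_alt ip1 ip2 h_
instance (ip1 : Int) (ip2 : Int) (h_ : Int) (out : Bool) : Decidable (Spec_improvementForHospital_pref ip1 ip2 h_ out) := by unfold Spec_improvementForHospital_pref; infer_instance

-- ===== CLAIM (what is proved, stated in full; the proofs are below) =====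
def Claim_equal_improvementForHospital_pref : Prop := ∀ (ip1 : Int) (ip2 : Int) (h_ : Int), Dom_improvementForHospital_pref ip1 ip2 h_ → Pre_improvementForHospital_pref ip1 ip2 h_ → Spec_improvementForHospital_pref ip1 ip2 h_ (improvementForHospital_pref ip1 ip2 h_)

-- ===== LEMMAS AND PROOFS =====

-- ===== VERDICT (by name: the statement is the Claim_ definition above) =====
theorem improvementForHospital_pref_spec : Claim_equal_improvementForHospital_pref := by
  intro ip1 ip2 h_ _ hpre
  obtain ⟨h1, h2, h3, h4, h5, h6⟩ := hpre
  unfold Spec_improvementForHospital_pref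
  interval_cases ip1 <;> interval_cases ip2 <;> interval_cases h_ <;> decide
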